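-- pv_equiv track=rewrite | github.com/andigenesis/brainrot-generator | backend/pipeline/diagram_generator.py | _extract_topic_context
-- ===== SOURCE A (Python) =====
-- def _extract_topic_context(keywords: list[str], original_text: str, window: int = 50) -> str:
--     """Extract text surrounding keywords from the original narration.
--
--     Args:
--         keywords: Keywords to search for in text
--         original_text: Full narration text
--         window: Number of words before/after keyword to include
--
--     Returns:
--         Extracted context string
--     """
--     words = original_text.split()
--     if not words:
--         return original_text
--
--     contexts = []
--     for keyword in keywords:
--         for i, word in enumerate(words):
--             if keyword.lower() in word.lower():
--                 start = max(0, i - window)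
--                 end = min(len(words), i + window + 1)
--                 contexts.append(' '.join(words[start:end]))
--                 break
--
--     return ' '.join(contexts) if contexts else original_text[:500]
-- ===== SOURCE B (Python) =====
-- def _extract_topic_context(keywords: list[str], original_text: str, window: int = 50) -> str:
--     words = original_text.split()
--     if not words:
--         return original_text
--     # single pass over words: record first matching index per (lowercased) keyword
--     remaining = list(dict.fromkeys(kw.lower() for kw in keywords))
--     first_idx = {}
--     for i, word in enumerate(words):
--         wl = word.lower()
--         still = []
--         for k in remaining:
--             if k in wl:
--                 first_idx[k] = i
--             else:
--                 still.append(k)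
--         remaining = still
--         if not remaining:
--             break
--     n = len(words)
--     parts = []
--     for kw in keywords:
--         i = first_idx.get(kw.lower())
--         if i is not None:
--             parts.append(' '.join(words[max(0, i - window):min(n, i + window + 1)]))
--     return ' '.join(parts) if parts else original_text[:500]
-- ===== Notes on version B (the rewrite author's own statement) =====
-- stated objective: alternative
-- what changed: A scans the whole word list from the start once per keyword; B makes a single pass over the words maintaining a deduplicated set of not-yet-found lowercased keywords (with early exit) and a dict keyword->first index, then emits the windows by iterating the keyword list over the dict.
import Mathlib
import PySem

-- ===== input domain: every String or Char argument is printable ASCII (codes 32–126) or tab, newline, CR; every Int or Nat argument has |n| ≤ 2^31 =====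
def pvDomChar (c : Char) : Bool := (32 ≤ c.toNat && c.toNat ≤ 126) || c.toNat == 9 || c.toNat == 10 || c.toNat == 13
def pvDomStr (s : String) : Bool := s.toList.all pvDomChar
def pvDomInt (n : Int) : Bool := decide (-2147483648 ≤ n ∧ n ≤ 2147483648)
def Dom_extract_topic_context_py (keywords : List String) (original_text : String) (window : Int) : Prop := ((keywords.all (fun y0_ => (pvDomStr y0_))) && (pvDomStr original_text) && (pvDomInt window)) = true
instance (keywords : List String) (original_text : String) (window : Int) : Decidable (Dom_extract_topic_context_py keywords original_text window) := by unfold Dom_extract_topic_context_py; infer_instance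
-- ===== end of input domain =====

-- B replaces A's per-keyword rescans of the word list by one pass over the words with a
-- shrinking set of not-yet-found lowercased keywords and a first-index dict (alternative decomposition).

-- ===== PORT A =====
-- inner 'for i, word in enumerate(words): if keyword.lower() in word.lower(): … break'
def pvFirstMatchA (keyword : String) : List String → Nat → Option Nat
  | [], _ => none
  | w :: ws, i =>
      if PySem.Str.isIn (PySem.Str.lower keyword) (PySem.Str.lower w) then some i
      else pvFirstMatchA keyword ws (i + 1)

def extract_topic_context_py (keywords : List String) (original_text : String) (window : Int) : String :=
  let words := PySem.Str.split₀ original_text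
  if words.isEmpty then original_text
  else
    let contexts := keywords.foldl (fun contexts keyword =>
      match pvFirstMatchA keyword words 0 with
      | some i =>
          let start : Int := max 0 ((i : Int) - window)
          let stop : Int := min ((words.length : Int)) ((i : Int) + window + 1)
          contexts ++ [PySem.Str.join " " (PySem.List.slice words (some start) (some stop))]
      | none => contexts) []
    if contexts ≠ [] then PySem.Str.join " " contexts
    else PySem.Str.slice original_text none (some 500)

-- ===== PORT B =====
-- one pass over the words: for each word, every still-unfound keyword contained in it is
-- recorded at this index and dropped from 'remaining'; early exit when 'remaining' is empty
def pvScanB : List String → Nat → List String → PySem.Dict String Nat → PySem.Dict String Nat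
  | [], _, _, d => d
  | w :: ws, i, remaining, d =>
      let wl := PySem.Str.lower w
      let p := remaining.foldl (fun (p : PySem.Dict String Nat × List String) k =>
          if PySem.Str.isIn k wl then (p.1.insert k i, p.2) else (p.1, p.2 ++ [k])) (d, [])
      if p.2.isEmpty then p.1 else pvScanB ws (i + 1) p.2 p.1

def extract_topic_context_py_alt (keywords : List String) (original_text : String) (window : Int) : String :=
  let words := PySem.Str.split₀ original_text
  if words.isEmpty then original_text
  else
    let firstIdx := pvScanB words 0 (PySem.List.dedup (keywords.map PySem.Str.lower)) PySem.Dict.empty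
    let n : Int := words.length
    let parts := keywords.foldl (fun parts kw =>
      match firstIdx.get? (PySem.Str.lower kw) with
      | some i => parts ++ [PySem.Str.join " "
          (PySem.List.slice words (some (max 0 ((i : Int) - window))) (some (min n ((i : Int) + window + 1))))]
      | none => parts) []
    if parts ≠ [] then PySem.Str.join " " parts
    else PySem.Str.slice original_text none (some 500)

-- ===== PRECONDITION & SPEC =====
def Spec_extract_topic_context_py (keywords : List String) (original_text : String) (window : Int) (out : String) : Prop := out = extract_topic_context_py_alt keywords original_text window
instance (keywords : List String) (original_text : String) (window : Int) (out : String) : Decidable (Spec_extract_topic_context_py keywords original_text window out) := by unfold Spec_extract_topic_context_py; infer_instance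

-- ===== CLAIM (what is proved, stated in full; the proofs are below) =====
def Claim_equal_extract_topic_context_py : Prop := ∀ (keywords : List String) (original_text : String) (window : Int), Dom_extract_topic_context_py keywords original_text window → Spec_extract_topic_context_py keywords original_text window (extract_topic_context_py keywords original_text window)

-- ===== LEMMAS AND PROOFS =====

-- A's inner search with the keyword pre-lowered (B's remaining keys are already lowercase)
def pvFirstMatchB (x : String) : List String → Nat → Option Nat
  | [], _ => none
  | w :: ws, i =>
      if PySem.Str.isIn x (PySem.Str.lower w) then some i
      else pvFirstMatchB x ws (i + 1)

theorem pvFirstMatchA_eq_B (keyword : String) (ws : List String) (i : Nat) :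
    pvFirstMatchA keyword ws i = pvFirstMatchB (PySem.Str.lower keyword) ws i := by
  induction ws generalizing i with
  | nil => rfl
  | cons w ws ih => simp [pvFirstMatchA, pvFirstMatchB, ih]

-- characterisation of the inner per-word fold of pvScanB
theorem pvInner_spec (wl : String) (i : Nat) (rem : List String)
    (d : PySem.Dict String Nat) (acc : List String) :
    (rem.foldl (fun (p : PySem.Dict String Nat × List String) k =>
        if PySem.Str.isIn k wl then (p.1.insert k i, p.2) else (p.1, p.2 ++ [k])) (d, acc)).2
      = acc ++ rem.filter (fun k => ! PySem.Str.isIn k wl)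
    ∧ ∀ x, (rem.foldl (fun (p : PySem.Dict String Nat × List String) k =>
        if PySem.Str.isIn k wl then (p.1.insert k i, p.2) else (p.1, p.2 ++ [k])) (d, acc)).1.get? x
      = if x ∈ rem ∧ PySem.Str.isIn x wl = true then some i else d.get? x := by
  induction rem generalizing d acc with
  | nil => simp
  | cons k rest ih =>
    by_cases hk : PySem.Str.isIn k wl = true
    · obtain ⟨h2, h1⟩ := ih (d.insert k i) acc
      constructor
      · rw [List.foldl_cons]
        simp only [if_pos hk]
        rw [h2, List.filter_cons, hk]
        simp only [Bool.not_true, Bool.false_eq_true, if_false]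
      · intro x
        rw [List.foldl_cons]
        simp only [if_pos hk]
        rw [h1 x, PySem.Dict.get?_insert]
        by_cases hx : x = k
        · subst hx
          rw [if_pos rfl]
          by_cases hr : x ∈ rest ∧ PySem.Str.isIn x wl = true
          · rw [if_pos hr, if_pos ⟨List.mem_cons_self, hk⟩]
          · rw [if_neg hr, if_pos ⟨List.mem_cons_self, hk⟩]
        · simp only [if_neg hx, List.mem_cons]
          by_cases hr : x ∈ rest ∧ PySem.Str.isIn x wl = true
          · rw [if_pos hr, if_pos ⟨Or.inr hr.1, hr.2⟩]
          · rw [if_neg hr, if_neg (by rintro ⟨hm | hm, hin⟩; exact hx hm; exact hr ⟨hm, hin⟩)]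
    · obtain ⟨h2, h1⟩ := ih d (acc ++ [k])
      constructor
      · rw [List.foldl_cons]
        simp only [if_neg hk]
        rw [h2, List.filter_cons]
        have : (! PySem.Str.isIn k wl) = true := by simpa using hk
        rw [this]
        simp
      · intro x
        rw [List.foldl_cons]
        simp only [if_neg hk]
        rw [h1 x]
        by_cases hr : x ∈ rest ∧ PySem.Str.isIn x wl = true
        · rw [if_pos hr, if_pos ⟨List.mem_cons_of_mem _ hr.1, hr.2⟩]
        · rw [if_neg hr, if_neg (by
            rintro ⟨hm, hin⟩
            rcases List.mem_cons.mp hm with hm | hm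
            · subst hm; exact hk hin
            · exact hr ⟨hm, hin⟩)]

-- the scan's lookup is A's first-match search for keys in 'remaining', untouched otherwise
theorem pvScanB_get? (words : List String) (i : Nat) (rem : List String)
    (d : PySem.Dict String Nat) (hout : ∀ k ∈ rem, d.get? k = none) (x : String) :
    (pvScanB words i rem d).get? x =
      if x ∈ rem then pvFirstMatchB x words i else d.get? x := by
  induction words generalizing i rem d with
  | nil =>
    simp only [pvScanB, pvFirstMatchB]
    by_cases hx : x ∈ rem
    · rw [if_pos hx, hout x hx]
    · rw [if_neg hx]
  | cons w ws ih =>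
    rw [pvScanB]
    obtain ⟨h2, h1⟩ := pvInner_spec (PySem.Str.lower w) i rem d []
    by_cases hstop : (rem.foldl (fun (p : PySem.Dict String Nat × List String) k =>
        if PySem.Str.isIn k (PySem.Str.lower w) then (p.1.insert k i, p.2) else (p.1, p.2 ++ [k])) (d, [])).2.isEmpty = true
    · rw [if_pos hstop, h1 x]
      by_cases hx : x ∈ rem
      · have hall : PySem.Str.isIn x (PySem.Str.lower w) = true := by
          rw [h2] at hstop
          simp only [List.nil_append, List.isEmpty_iff, List.filter_eq_nil_iff] at hstop
          have := hstop x hx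
          simpa using this
        rw [if_pos ⟨hx, hall⟩, if_pos hx, pvFirstMatchB, if_pos hall]
      · rw [if_neg (fun h => hx h.1), if_neg hx]
    · have hout' : ∀ k ∈ (rem.foldl (fun (p : PySem.Dict String Nat × List String) k =>
          if PySem.Str.isIn k (PySem.Str.lower w) then (p.1.insert k i, p.2) else (p.1, p.2 ++ [k])) (d, [])).2,
          (rem.foldl (fun (p : PySem.Dict String Nat × List String) k =>
          if PySem.Str.isIn k (PySem.Str.lower w) then (p.1.insert k i, p.2) else (p.1, p.2 ++ [k])) (d, [])).1.get? k = none := by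
        intro k hkmem
        rw [h2] at hkmem
        simp only [List.nil_append, List.mem_filter] at hkmem
        rw [h1 k, if_neg (by rintro ⟨-, hc⟩; exact absurd hkmem.2 (by rw [hc]; simp)), hout k hkmem.1]
      rw [if_neg hstop, ih _ _ _ hout', h2]
      simp only [List.nil_append, List.mem_filter]
      by_cases hx : x ∈ rem
      · by_cases hin : PySem.Str.isIn x (PySem.Str.lower w) = true
        · rw [if_neg (by rintro ⟨-, hc⟩; rw [hin] at hc; simp at hc), h1 x, if_pos ⟨hx, hin⟩, if_pos hx,
            pvFirstMatchB, if_pos hin]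
        · rw [if_pos ⟨hx, by simpa using hin⟩, if_pos hx, pvFirstMatchB, if_neg hin]
      · rw [if_neg (fun h => hx h.1), h1 x, if_neg (fun h => hx h.1), if_neg hx]

-- the two accumulation loops produce the same list
theorem pvFold_eq (keywords words : List String) (window : Int) :
    keywords.foldl (fun contexts keyword =>
      match pvFirstMatchA keyword words 0 with
      | some i =>
          contexts ++ [PySem.Str.join " " (PySem.List.slice words
            (some (max 0 ((i : Int) - window))) (some (min ((words.length : Int)) ((i : Int) + window + 1))))]
      | none => contexts) []
    = keywords.foldl (fun parts kw =>
      match (pvScanB words 0 (PySem.List.dedup (keywords.map PySem.Str.lower)) PySem.Dict.empty).get? (PySem.Str.lower kw) with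
      | some i => parts ++ [PySem.Str.join " " (PySem.List.slice words
            (some (max 0 ((i : Int) - window))) (some (min ((words.length : Int)) ((i : Int) + window + 1))))]
      | none => parts) [] := by
  apply PySem.List.foldl_congr_mem
  intro acc kw hkw
  have hmem : PySem.Str.lower kw ∈ PySem.List.dedup (keywords.map PySem.Str.lower) := by
    rw [PySem.List.mem_dedup]
    exact List.mem_map_of_mem hkw
  rw [pvScanB_get? _ _ _ _ (fun k _ => PySem.Dict.get?_empty k), if_pos hmem, ← pvFirstMatchA_eq_B]

-- ===== VERDICT (by name: the statement is the Claim_ definition above) =====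
theorem extract_topic_context_py_spec : Claim_equal_extract_topic_context_py := by
  intro keywords original_text window _
  unfold Spec_extract_topic_context_py extract_topic_context_py extract_topic_context_py_alt
  simp only []
  by_cases h : (PySem.Str.split₀ original_text).isEmpty
  · simp [h]
  · simp only [h, if_false, Bool.false_eq_true]
    rw [pvFold_eq keywords (PySem.Str.split₀ original_text) window]
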